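-- pv_equiv track=rewrite | github.com/wilsonwcyiu/210418_iaim_group_asm | rosa/util.py | get_pattern_of_column
-- ===== SOURCE A (Python) =====
-- def get_pattern_of_column(column_values: list):
--     pattern = []
--     count = 1
--     for i in range(1, len(column_values)-1):
--         if column_values[i] == column_values[i-1]:
--             count += 1
--         else:
--             pattern.append(count)
--             count = 1
--
--     return pattern
-- ===== SOURCE B (Python) =====
-- def get_pattern_of_column(column_values: list):
--     # Boundary-index method: collect the positions where the value changes
--     # (over the same index range A scans); the run lengths A reports are the
--     # differences between consecutive boundary positions (with 0 prepended).
--     n = len(column_values)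
--     breaks = [i for i in range(1, n - 1) if column_values[i] != column_values[i - 1]]
--     return [b - a for a, b in zip([0] + breaks, breaks)]
-- ===== Notes on version B (the rewrite author's own statement) =====
-- stated objective: simpler
-- what changed: B replaces A's running-counter loop by two staged comprehensions: it first collects the boundary indices where the value changes, then returns the adjacent differences of those indices (with 0 prepended), which are exactly the run lengths A emits.
import Mathlib
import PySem

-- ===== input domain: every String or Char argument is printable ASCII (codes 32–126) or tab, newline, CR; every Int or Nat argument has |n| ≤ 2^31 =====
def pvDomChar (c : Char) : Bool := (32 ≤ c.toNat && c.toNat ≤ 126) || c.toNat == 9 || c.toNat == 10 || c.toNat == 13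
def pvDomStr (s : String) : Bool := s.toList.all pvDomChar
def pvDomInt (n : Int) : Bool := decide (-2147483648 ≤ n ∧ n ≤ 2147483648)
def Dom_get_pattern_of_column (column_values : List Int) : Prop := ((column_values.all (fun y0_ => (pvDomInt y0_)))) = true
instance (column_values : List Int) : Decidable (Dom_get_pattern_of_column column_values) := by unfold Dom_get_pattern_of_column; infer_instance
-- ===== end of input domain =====

-- B replaces A's running-counter loop by two staged passes: collect the boundary
-- indices where the value changes, then take adjacent differences; objective:
-- simpler, same O(n) cost.


-- ===== PORT A =====
-- for i in range(1, len-1): compare xs[i] with xs[i-1]; both indices are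
-- always in range there, so the total pyGetD is exact.
def get_pattern_of_column (column_values : List Int) : List Int :=
  ((PySem.List.pyRange 1 (PySem.List.len column_values - 1) 1).foldl
    (fun (st : List Int × Int) i =>
      if PySem.List.pyGetD column_values i 0 = PySem.List.pyGetD column_values (i - 1) 0
      then (st.1, st.2 + 1)
      else (st.1 ++ [st.2], 1))
    ([], 1)).1

-- ===== PORT B =====
-- breaks = [i for i in range(1, n-1) if xs[i] != xs[i-1]] (indices in range,
-- so pyGetD is exact); then [b - a for a, b in zip([0]+breaks, breaks)].
def get_pattern_of_column_alt (column_values : List Int) : List Int :=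
  let breaks := (PySem.List.pyRange 1 (PySem.List.len column_values - 1) 1).filter
    (fun i => decide (PySem.List.pyGetD column_values i 0 ≠ PySem.List.pyGetD column_values (i - 1) 0))
  (((0 : Int) :: breaks).zip breaks).map (fun ab => ab.2 - ab.1)

-- ===== PRECONDITION & SPEC =====
def Spec_get_pattern_of_column (column_values : List Int) (out : List Int) : Prop := out = get_pattern_of_column_alt column_values
instance (column_values : List Int) (out : List Int) : Decidable (Spec_get_pattern_of_column column_values out) := by unfold Spec_get_pattern_of_column; infer_instance

-- ===== CLAIM (what is proved, stated in full; the proofs are below) =====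
def Claim_equal_get_pattern_of_column : Prop := ∀ (column_values : List Int), Dom_get_pattern_of_column column_values → Spec_get_pattern_of_column column_values (get_pattern_of_column column_values)

-- ===== LEMMAS AND PROOFS =====

-- adjacent differences of a list of boundary positions, previous boundary p
def pvDiffs (p : Int) : List Int → List Int
  | [] => []
  | b :: bs => (b - p) :: pvDiffs b bs

theorem zip_diffs (bs : List Int) : ∀ (p : Int),
    ((p :: bs).zip bs).map (fun ab : Int × Int => ab.2 - ab.1) = pvDiffs p bs := by
  induction bs with
  | nil => intro p; simp [pvDiffs]
  | cons b bs ih => intro p; simp [pvDiffs, ih b]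

-- A's counter fold, started with count = j - p (p = previous boundary),
-- produces the adjacent differences of the boundaries in the scanned range.
theorem a_fold (xs : List Int) : ∀ (k : Nat) (j p : Int) (acc : List Int),
    ((PySem.List.pyRange j (j + (k : Int)) 1).foldl
      (fun (st : List Int × Int) i =>
        if PySem.List.pyGetD xs i 0 = PySem.List.pyGetD xs (i - 1) 0
        then (st.1, st.2 + 1)
        else (st.1 ++ [st.2], 1))
      (acc, j - p)).1
    = acc ++ pvDiffs p ((PySem.List.pyRange j (j + (k : Int)) 1).filter
        (fun i => decide (PySem.List.pyGetD xs i 0 ≠ PySem.List.pyGetD xs (i - 1) 0))) := by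
  intro k
  induction k with
  | zero =>
    intro j p acc
    have hnil : PySem.List.pyRange j (j + ((0 : Nat) : Int)) 1 = [] :=
      PySem.List.pyRange_one_eq_nil (by omega)
    rw [hnil]; simp [pvDiffs]
  | succ k ih =>
    intro j p acc
    have hcons : PySem.List.pyRange j (j + ((k + 1 : Nat) : Int)) 1
        = j :: PySem.List.pyRange (j + 1) (j + ((k + 1 : Nat) : Int)) 1 :=
      PySem.List.pyRange_one_cons (by push_cast; omega)
    have hend : j + ((k + 1 : Nat) : Int) = (j + 1) + ((k : Nat) : Int) := by push_cast; ring
    rw [hcons, List.foldl_cons, List.filter_cons]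
    by_cases h : PySem.List.pyGetD xs j 0 = PySem.List.pyGetD xs (j - 1) 0
    · rw [if_pos h]
      have hstep : ((acc, j - p).1, (acc, j - p).2 + 1) = (acc, (j + 1) - p) := by
        simp; ring
      rw [hstep, hend, ih (j + 1) p acc]
      simp [h]
    · rw [if_neg h]
      have hstep : ((acc, j - p).1 ++ [(acc, j - p).2], (1 : Int))
          = (acc ++ [j - p], (j + 1) - j) := by simp
      rw [hstep, hend, ih (j + 1) j (acc ++ [j - p])]
      simp [h, pvDiffs, List.append_assoc]

-- ===== VERDICT (by name: the statement is the Claim_ definition above) =====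
theorem get_pattern_of_column_spec : Claim_equal_get_pattern_of_column := by
  intro xs _
  unfold Spec_get_pattern_of_column get_pattern_of_column get_pattern_of_column_alt
  simp only [PySem.List.len_eq]
  rw [zip_diffs]
  by_cases hn : (xs.length : Int) - 1 ≤ 1
  · have hnil : PySem.List.pyRange 1 ((xs.length : Int) - 1) 1 = [] :=
      PySem.List.pyRange_one_eq_nil (by omega)
    rw [hnil]; simp [pvDiffs]
  · have hk : (xs.length : Int) - 1 = 1 + ((xs.length - 2 : Nat) : Int) := by
      omega
    have h1 : (1 : Int) = 1 - 0 := by ring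
    rw [hk]
    conv_lhs => rw [h1]
    exact a_fold xs (xs.length - 2) 1 0 []
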